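-- pv_equiv track=rewrite | github.com/JohnBryte/SudokuSolver | Solver.py | convert_grid
-- ===== SOURCE A (Python) =====
-- def convert_grid(grid):
--     #converts solved grid(=dict) to matrix so we can print it out
--     solved_grid = []
--     bla = []
--     counter = 0
--     for cell, value in grid.items():
--         bla.append(int(value))
--         counter += 1
--         if cell[-1] == '9':
--             solved_grid.append(bla)
--             bla = []
--             counter = 0
--     return solved_grid
-- ===== SOURCE B (Python) =====
-- def convert_grid(grid):
--     values = [int(v) for v in grid.values()]
--     boundaries = [i for i, cell in enumerate(grid) if cell[-1] == '9']
--     rows = []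
--     start = 0
--     for b in boundaries:
--         rows.append(values[start:b + 1])
--         start = b + 1
--     return rows
-- ===== Notes on version B (the rewrite author's own statement) =====
-- stated objective: alternative
-- what changed: Instead of one loop that grows a pending row cell by cell and flushes it at each '9'-column, B precomputes the value list and the boundary indices and builds each row by slicing values between consecutive boundaries.
import Mathlib
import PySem

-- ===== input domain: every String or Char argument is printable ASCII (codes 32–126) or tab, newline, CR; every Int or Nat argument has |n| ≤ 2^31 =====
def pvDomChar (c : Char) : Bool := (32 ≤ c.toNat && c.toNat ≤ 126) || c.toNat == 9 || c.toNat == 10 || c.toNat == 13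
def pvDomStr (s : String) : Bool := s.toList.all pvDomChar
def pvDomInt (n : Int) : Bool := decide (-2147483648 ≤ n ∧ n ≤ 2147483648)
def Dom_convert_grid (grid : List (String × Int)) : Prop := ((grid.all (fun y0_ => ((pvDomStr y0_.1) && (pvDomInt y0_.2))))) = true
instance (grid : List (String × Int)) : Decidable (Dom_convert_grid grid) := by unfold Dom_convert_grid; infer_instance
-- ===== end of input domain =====

-- B replaces A's flush-on-boundary accumulator loop by precomputed boundary indices and slicing (alternative decomposition, same cost).


-- ===== PORT A =====
-- literal port of A: one pass; 'bla' accumulates the pending row, flushed when the key ends in '9'; 'counter' kept although unused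
def convert_grid (grid : List (String × Int)) : List (List Int) :=
  (grid.foldl (fun (st : List (List Int) × List Int × Int) cv =>
      let bla := st.2.1 ++ [cv.2]
      let counter := st.2.2 + 1
      if PySem.Str.pyGet? cv.1 (-1) == some '9' then (st.1 ++ [bla], [], 0)
      else (st.1, bla, counter))
    ([], [], 0)).1

-- ===== PORT B =====
-- literal port of Source B: values list, boundary indices via enumerate over the keys, then rows by slicing
def convert_grid_alt (grid : List (String × Int)) : List (List Int) :=
  let values : List Int := grid.map (fun kv => kv.2)
  let boundaries : List Int :=
    ((PySem.List.enumerate (grid.map (fun kv => kv.1)) 0).filter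
      (fun ic => PySem.Str.pyGet? ic.2 (-1) == some '9')).map (fun ic => ic.1)
  (boundaries.foldl (fun (st : List (List Int) × Int) b =>
      (st.1 ++ [PySem.List.slice values (some st.2) (some (b + 1))], b + 1))
    ([], 0)).1

-- ===== PRECONDITION & SPEC =====
-- Pre_ excludes grids containing a zero-length key: there Python A raises IndexError on cell[-1]
def Pre_convert_grid (grid : List (String × Int)) : Prop :=
  (grid.all (fun kv => kv.1 ≠ "")) = true
instance (grid : List (String × Int)) : Decidable (Pre_convert_grid grid) := by
  unfold Pre_convert_grid; infer_instance
def pvWitness_convert_grid : (List (String × Int)) := [("a9", 5)]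

def Spec_convert_grid (grid : List (String × Int)) (out : List (List Int)) : Prop := out = convert_grid_alt grid
instance (grid : List (String × Int)) (out : List (List Int)) : Decidable (Spec_convert_grid grid out) := by unfold Spec_convert_grid; infer_instance

-- ===== CLAIM (what is proved, stated in full; the proofs are below) =====
def Claim_equal_convert_grid : Prop := ∀ (grid : List (String × Int)), Dom_convert_grid grid → Pre_convert_grid grid → Spec_convert_grid grid (convert_grid grid)

-- ===== LEMMAS AND PROOFS =====

-- reference recursion: the rows of `grid` given a pending partial row `pend`
def rowsSpec : List (String × Int) → List Int → List (List Int)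
  | [], _ => []
  | (c, v) :: rest, pend =>
    if PySem.List.pyGet? c.toList (-1) = some '9' then (pend ++ [v]) :: rowsSpec rest []
    else rowsSpec rest (pend ++ [v])

-- local boundary indices of `grid`, offset by `s`
def bnds : List (String × Int) → Int → List Int
  | [], _ => []
  | (c, _) :: rest, s =>
    if PySem.List.pyGet? c.toList (-1) = some '9' then s :: bnds rest (s + 1) else bnds rest (s + 1)

lemma portA_foldl (grid : List (String × Int)) :
    ∀ (acc : List (List Int)) (pend : List Int) (cnt : Int),
      (grid.foldl (fun (st : List (List Int) × List Int × Int) cv =>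
          let bla := st.2.1 ++ [cv.2]
          let counter := st.2.2 + 1
          if PySem.Str.pyGet? cv.1 (-1) == some '9' then (st.1 ++ [bla], [], 0)
          else (st.1, bla, counter)) (acc, pend, cnt)).1
        = acc ++ rowsSpec grid pend := by
  induction grid with
  | nil => intro acc pend cnt; simp [rowsSpec]
  | cons cv rest ih =>
    intro acc pend cnt
    obtain ⟨c, v⟩ := cv
    simp only [PySem.Str.pyGet?_eq, PySem.Chars.pyGet?_eq_listPyGet?, beq_iff_eq] at ih
    by_cases h : PySem.List.pyGet? c.toList (-1) = some '9' <;>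
      simp [rowsSpec, h, ih]

lemma boundaries_eq (grid : List (String × Int)) : ∀ (s : Int),
    ((PySem.List.enumerate (grid.map (fun kv => kv.1)) s).filter
      (fun ic => PySem.Str.pyGet? ic.2 (-1) == some '9')).map (fun ic => ic.1)
      = bnds grid s := by
  induction grid with
  | nil => intro s; simp [bnds, PySem.List.enumerate_nil]
  | cons cv rest ih =>
    intro s
    obtain ⟨c, v⟩ := cv
    simp only [PySem.Str.pyGet?_eq, PySem.Chars.pyGet?_eq_listPyGet?, beq_iff_eq] at ih
    by_cases h : PySem.List.pyGet? c.toList (-1) = some '9' <;>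
      simp [bnds, PySem.List.enumerate_cons, h, ih]

lemma slice_pend (done pend rest : List Int) (v : Int) :
    PySem.List.slice (done ++ (pend ++ v :: rest))
      (some (done.length : Int)) (some ((done.length : Int) + (pend.length : Int) + 1))
      = pend ++ [v] := by
  have hcast : ((done.length : Int)) + (pend.length : Int) + 1
      = ((done.length : Int)) + (((pend.length + 1 : Nat)) : Int) := by push_cast; ring
  rw [hcast, PySem.List.slice_natCast_add]
  have hd : (done ++ (pend ++ v :: rest)).drop done.length = pend ++ v :: rest := by simp
  rw [hd]
  have hsplit : pend ++ v :: rest = (pend ++ [v]) ++ rest := by simp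
  rw [hsplit, List.take_append_of_le_length (by simp)]
  simp

lemma portB_foldl (grid : List (String × Int)) :
    ∀ (done pend : List Int) (rows : List (List Int)) (s t : Int),
      t = (done.length : Int) → s = t + (pend.length : Int) →
      ((bnds grid s).foldl
          (fun (st : List (List Int) × Int) b =>
            (st.1 ++ [PySem.List.slice (done ++ (pend ++ grid.map (fun kv => kv.2)))
                        (some st.2) (some (b + 1))], b + 1))
          (rows, t)).1
        = rows ++ rowsSpec grid pend := by
  induction grid with
  | nil => intro done pend rows s t ht hs; simp [bnds, rowsSpec]
  | cons cv rest ih =>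
    intro done pend rows s t ht hs
    obtain ⟨c, v⟩ := cv
    subst ht; subst hs
    by_cases h : PySem.List.pyGet? c.toList (-1) = some '9'
    · have ihx := ih (done ++ pend ++ [v]) [] (rows ++ [pend ++ [v]])
        ((done.length : Int) + (pend.length : Int) + 1)
        ((done.length : Int) + (pend.length : Int) + 1)
        (by simp; push_cast; ring) (by simp)
      simp only [List.append_assoc, List.append_nil, List.singleton_append,
        List.cons_append, List.map_cons] at ihx
      simp only [bnds, h, if_pos, List.foldl_cons, List.map_cons, rowsSpec]
      rw [slice_pend done pend (rest.map (fun kv => kv.2)) v]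
      simpa using ihx
    · have ihx := ih done (pend ++ [v]) rows
        ((done.length : Int) + (pend.length : Int) + 1) (done.length : Int)
        rfl (by simp only [List.length_append, List.length_cons, List.length_nil]; push_cast; ring)
      simp only [List.append_assoc, List.singleton_append, List.cons_append,
        List.map_cons] at ihx
      simp only [bnds, h, if_neg, List.foldl_cons, List.map_cons, rowsSpec]
      simpa using ihx

-- ===== VERDICT (by name: the statement is the Claim_ definition above) =====
theorem convert_grid_spec : Claim_equal_convert_grid := by
  intro grid _ _
  unfold Spec_convert_grid convert_grid convert_grid_alt
  rw [portA_foldl grid [] [] 0, boundaries_eq grid 0]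
  have h := portB_foldl grid [] [] [] 0 0 (by simp) (by simp)
  simp only [List.nil_append] at h
  exact h.symm
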